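-- pv_equiv track=rewrite | github.com/BenAlexPass/LearningToCode | Birthday Paradox.py | findSimilarBirthdays
-- ===== SOURCE A (Python) =====
-- def findSimilarBirthdays(birthdaySetIn):
--     counter = 0
--     for i in range(len(birthdaySetIn)):
--         currentBirthday = birthdaySetIn[i]
--         currentMonth = currentBirthday[1]
--         currentDay = currentBirthday[0]
--         j = i+1
--         for j in range(j, len(birthdaySetIn)):
--             tempBirthday = birthdaySetIn[j]
--             tempMonth = tempBirthday[1]
--             tempDay = tempBirthday[0]
--             if currentMonth == tempMonth and currentDay == tempDay:
--                 counter += 1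
--     return counter
-- ===== SOURCE B (Python) =====
-- def findSimilarBirthdays(birthdaySetIn):
--     # Count occurrences of each (day, month) once, then sum k*(k-1)//2 pairs per group: O(n) instead of A's O(n^2).
--     counts = {}
--     for b in birthdaySetIn:
--         key = (b[0], b[1])
--         counts[key] = counts.get(key, 0) + 1
--     return sum(v * (v - 1) // 2 for v in counts.values())
-- ===== Notes on version B (the rewrite author's own statement) =====
-- stated objective: faster
-- what changed: Replaces A's O(n^2) all-pairs double loop by a single-pass hash count of (day,month) keys followed by summing k*(k-1)/2 over the group sizes.
import Mathlib
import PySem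

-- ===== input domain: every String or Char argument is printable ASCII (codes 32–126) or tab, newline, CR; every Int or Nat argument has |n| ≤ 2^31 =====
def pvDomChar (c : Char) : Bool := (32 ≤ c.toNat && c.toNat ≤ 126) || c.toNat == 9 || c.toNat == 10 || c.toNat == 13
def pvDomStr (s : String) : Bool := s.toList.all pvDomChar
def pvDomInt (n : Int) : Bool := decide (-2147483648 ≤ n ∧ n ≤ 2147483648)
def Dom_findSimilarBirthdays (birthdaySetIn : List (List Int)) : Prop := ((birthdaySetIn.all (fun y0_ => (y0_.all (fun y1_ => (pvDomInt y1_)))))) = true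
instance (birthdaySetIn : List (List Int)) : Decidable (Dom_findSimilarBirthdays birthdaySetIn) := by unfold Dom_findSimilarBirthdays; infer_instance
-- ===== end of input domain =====

-- B replaces A's all-pairs double loop by one counting pass over (day, month) keys
-- plus a sum of v*(v-1)//2 over the group sizes (objective: faster).


-- ===== PORT A =====
def findSimilarBirthdays (birthdaySetIn : List (List Int)) : Int :=
  (PySem.List.pyRange 0 (birthdaySetIn.length : Int) 1).foldl (fun counter i =>
    let currentBirthday := PySem.List.pyGetD birthdaySetIn i []
    let currentMonth := PySem.List.pyGetD currentBirthday 1 0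
    let currentDay := PySem.List.pyGetD currentBirthday 0 0
    (PySem.List.pyRange (i + 1) (birthdaySetIn.length : Int) 1).foldl (fun c j =>
      let tempBirthday := PySem.List.pyGetD birthdaySetIn j []
      let tempMonth := PySem.List.pyGetD tempBirthday 1 0
      let tempDay := PySem.List.pyGetD tempBirthday 0 0
      if currentMonth == tempMonth && currentDay == tempDay then c + 1 else c) counter) 0

-- ===== PORT B =====
def findSimilarBirthdays_alt (birthdaySetIn : List (List Int)) : Int :=
  let counts : PySem.Dict (Int × Int) Int :=
    birthdaySetIn.foldl (fun d b =>
      let key := (PySem.List.pyGetD b 0 0, PySem.List.pyGetD b 1 0)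
      d.insert key (d.getD key 0 + 1)) PySem.Dict.empty
  counts.values.foldl (fun s v => s + PySem.Int.floordiv (v * (v - 1)) 2) 0

-- ===== PRECONDITION & SPEC =====
-- Pre_ excludes exactly the inputs on which Python A raises IndexError: a non-empty
-- input containing an inner list with fewer than 2 entries (birthday[1] is read).
def Pre_findSimilarBirthdays (birthdaySetIn : List (List Int)) : Prop :=
  ∀ b ∈ birthdaySetIn, 2 ≤ b.length
instance (birthdaySetIn : List (List Int)) : Decidable (Pre_findSimilarBirthdays birthdaySetIn) := by unfold Pre_findSimilarBirthdays; infer_instance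
def pvWitness_findSimilarBirthdays : List (List Int) := [[7, 3], [7, 3], [1, 2]]
def Spec_findSimilarBirthdays (birthdaySetIn : List (List Int)) (out : Int) : Prop := out = findSimilarBirthdays_alt birthdaySetIn
instance (birthdaySetIn : List (List Int)) (out : Int) : Decidable (Spec_findSimilarBirthdays birthdaySetIn out) := by unfold Spec_findSimilarBirthdays; infer_instance

-- ===== CLAIM (what is proved, stated in full; the proofs are below) =====
def Claim_equal_findSimilarBirthdays : Prop := ∀ (birthdaySetIn : List (List Int)), Dom_findSimilarBirthdays birthdaySetIn → Pre_findSimilarBirthdays birthdaySetIn → Spec_findSimilarBirthdays birthdaySetIn (findSimilarBirthdays birthdaySetIn)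

-- ===== LEMMAS AND PROOFS =====

-- the (day, month) key both programs compare / count
def pvKey (b : List Int) : Int × Int := (PySem.List.pyGetD b 0 0, PySem.List.pyGetD b 1 0)

-- pairs of equal keys: head against the tail, then the tail
def pvPairs : List (Int × Int) → Int
  | [] => 0
  | x :: xs => (xs.count x : Int) + pvPairs xs

-- v*(v-1)//2
def pvC2 (v : Int) : Int := PySem.Int.floordiv (v * (v - 1)) 2

lemma pvC2_succ (c : Int) : pvC2 (c + 1) = pvC2 c + c := by
  obtain ⟨m, hm⟩ := Int.even_mul_succ_self (c - 1)
  unfold pvC2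
  rw [PySem.Int.floordiv_eq_ediv_of_pos (by norm_num), PySem.Int.floordiv_eq_ediv_of_pos (by norm_num)]
  have h1 : (c + 1) * (c + 1 - 1) = 2 * (m + c) := by nlinarith [hm]
  have h2 : c * (c - 1) = 2 * m := by nlinarith [hm]
  rw [h1, h2, Int.mul_ediv_cancel_left _ (by norm_num), Int.mul_ediv_cancel_left _ (by norm_num)]

lemma pvC2_zero : pvC2 0 = 0 := by decide

lemma intBeq_comm (x y : Int) : (x == y) = (y == x) := by
  cases h : (x == y) <;> cases h2 : (y == x) <;> simp_all

lemma match_eq_key (cur t : List Int) :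
    ((PySem.List.pyGetD cur 1 0 == PySem.List.pyGetD t 1 0) &&
     (PySem.List.pyGetD cur 0 0 == PySem.List.pyGetD t 0 0))
    = (pvKey t == pvKey cur) := by
  simp only [pvKey]
  rw [show ((PySem.List.pyGetD t 0 0, PySem.List.pyGetD t 1 0) == (PySem.List.pyGetD cur 0 0, PySem.List.pyGetD cur 1 0))
      = ((PySem.List.pyGetD t 0 0 == PySem.List.pyGetD cur 0 0) && (PySem.List.pyGetD t 1 0 == PySem.List.pyGetD cur 1 0)) from rfl]
  rw [Bool.and_comm, intBeq_comm (PySem.List.pyGetD cur 1 0), intBeq_comm (PySem.List.pyGetD cur 0 0)]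

lemma sum_aux : ∀ bs : List (List Int),
    ((List.range bs.length).map (fun k =>
      (((bs.drop (k+1)).countP (fun t => pvKey t == pvKey (bs.getD k []))) : Int))).sum
    = pvPairs (bs.map pvKey)
  | [] => by simp [pvPairs]
  | b :: rest => by
    simp only [List.length_cons]
    rw [List.range_succ_eq_map]
    simp only [List.map_cons, List.map_map, List.sum_cons, Function.comp_def]
    have hshift : ∀ k : Nat, (((b :: rest).drop (k+1+1)).countP (fun t => pvKey t == pvKey ((b :: rest).getD (k+1) [])) : Int)
        = ((rest.drop (k+1)).countP (fun t => pvKey t == pvKey (rest.getD k [])) : Int) := by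
      intro k; rfl
    simp only [Nat.succ_eq_add_one, hshift]
    rw [sum_aux rest]
    simp [pvPairs, List.count_eq_countP, List.countP_map, Function.comp_def]

lemma A_eq_pairs (bs : List (List Int)) :
    findSimilarBirthdays bs = pvPairs (bs.map pvKey) := by
  unfold findSimilarBirthdays
  show List.foldl (fun counter i =>
      List.foldl (fun c j =>
        if ((PySem.List.pyGetD (PySem.List.pyGetD bs i []) 1 0 == PySem.List.pyGetD (PySem.List.pyGetD bs j []) 1 0) &&
            (PySem.List.pyGetD (PySem.List.pyGetD bs i []) 0 0 == PySem.List.pyGetD (PySem.List.pyGetD bs j []) 0 0))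
        then c + 1 else c) counter (PySem.List.pyRange (i + 1) (bs.length : Int) 1))
      0 (PySem.List.pyRange 0 (bs.length : Int) 1) = pvPairs (bs.map pvKey)
  have hbody : ∀ (acc : Int) (i : Int), i ∈ PySem.List.pyRange 0 (bs.length : Int) 1 →
      List.foldl (fun c j =>
        if ((PySem.List.pyGetD (PySem.List.pyGetD bs i []) 1 0 == PySem.List.pyGetD (PySem.List.pyGetD bs j []) 1 0) &&
            (PySem.List.pyGetD (PySem.List.pyGetD bs i []) 0 0 == PySem.List.pyGetD (PySem.List.pyGetD bs j []) 0 0))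
        then c + 1 else c) acc (PySem.List.pyRange (i + 1) (bs.length : Int) 1)
      = acc + (((bs.drop (i+1).toNat).countP
          (fun t => pvKey t == pvKey (PySem.List.pyGetD bs i []))) : Int) := by
    intro acc i hi
    have hi0 : (0:Int) ≤ i + 1 := by
      have := (PySem.List.mem_pyRange_one.mp hi).1; omega
    rw [show (fun (c:Int) j =>
        if ((PySem.List.pyGetD (PySem.List.pyGetD bs i []) 1 0 == PySem.List.pyGetD (PySem.List.pyGetD bs j []) 1 0) &&
            (PySem.List.pyGetD (PySem.List.pyGetD bs i []) 0 0 == PySem.List.pyGetD (PySem.List.pyGetD bs j []) 0 0))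
        then c + 1 else c)
      = (fun (c:Int) j => (fun (c:Int) (t : List Int) => if (pvKey t == pvKey (PySem.List.pyGetD bs i [])) then c + 1 else c) c (PySem.List.pyGetD bs j [])) from by
        funext c j; rw [match_eq_key]]
    rw [PySem.List.foldl_pyRange_pyGetD' bs []
      (f := fun (c:Int) (t : List Int) => if (pvKey t == pvKey (PySem.List.pyGetD bs i [])) then c + 1 else c) acc hi0]
    rw [PySem.List.foldl_if_add_one]
  rw [PySem.List.foldl_congr_mem _ _
    (fun acc i => acc + (((bs.drop (i+1).toNat).countP
        (fun t => pvKey t == pvKey (PySem.List.pyGetD bs i []))) : Int)) 0 hbody]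
  rw [PySem.List.foldl_add]
  rw [PySem.List.pyRange_one]
  simp only [List.map_map, Function.comp_def]
  rw [← sum_aux bs]
  have hlen : ((bs.length : Int) - 0).toNat = bs.length := by omega
  rw [hlen]
  rw [zero_add]
  apply congrArg List.sum
  apply List.map_congr_left
  intro k hk
  have h3 : ((0:Int) + (k:Int) + 1).toNat = k + 1 := by omega
  have h2 : PySem.List.pyGetD bs ((0:Int) + (k:Int)) [] = bs.getD k [] := by simp
  rw [h2, h3]

lemma B_eq_sum (bs : List (List Int)) :
    findSimilarBirthdays_alt bs =
      ((PySem.Set.ofList (bs.map pvKey)).map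
        (fun k => pvC2 ((bs.map pvKey).count k))).sum := by
  unfold findSimilarBirthdays_alt
  have h1 : bs.foldl (fun (d : PySem.Dict (Int × Int) Int) b =>
      d.insert (pvKey b) (d.getD (pvKey b) 0 + 1)) PySem.Dict.empty
      = PySem.Dict.counter (bs.map pvKey) := by
    rw [← PySem.Dict.foldl_insert_getD_add_one_eq_counter, List.foldl_map]
  simp only [pvKey] at h1
  rw [h1, PySem.List.foldl_add]
  simp only [PySem.Dict.values, PySem.Dict.items_counter]
  simp [pvC2, List.map_map, Function.comp_def]

lemma pairs_eq_sum : ∀ (l : List (Int × Int)) (S : List (Int × Int)), S.Nodup →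
    (∀ k ∈ l, k ∈ S) →
    (S.map (fun k => pvC2 ((l.count k : Nat) : Int))).sum = pvPairs l
  | [], S, _, _ => by simp [pvPairs, pvC2_zero]
  | x :: xs, S, hnd, hmem => by
    obtain ⟨S1, S2, hS⟩ := List.append_of_mem (hmem x List.mem_cons_self)
    subst hS
    have hx1 : x ∉ S1 := by
      intro h; exact (List.disjoint_of_nodup_append hnd) h List.mem_cons_self
    have hx2 : x ∉ S2 := by
      have := List.Nodup.of_append_right hnd
      exact (List.nodup_cons.mp this).1
    have hcount1 : ∀ k ∈ S1, ((x :: xs).count k : Int) = (xs.count k : Int) := by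
      intro k hk
      rw [List.count_cons_of_ne (fun h => hx1 (by rw [h]; exact hk))]
    have hcount2 : ∀ k ∈ S2, ((x :: xs).count k : Int) = (xs.count k : Int) := by
      intro k hk
      rw [List.count_cons_of_ne (fun h => hx2 (by rw [h]; exact hk))]
    have hIH := pairs_eq_sum xs (S1 ++ x :: S2) hnd
      (fun k hk => hmem k (List.mem_cons_of_mem x hk))
    have hA : S1.map (fun k => pvC2 (((x :: xs).count k : Nat) : Int))
        = S1.map (fun k => pvC2 ((xs.count k : Nat) : Int)) :=
      List.map_congr_left (fun k hk => by rw [hcount1 k hk])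
    have hB : S2.map (fun k => pvC2 (((x :: xs).count k : Nat) : Int))
        = S2.map (fun k => pvC2 ((xs.count k : Nat) : Int)) :=
      List.map_congr_left (fun k hk => by rw [hcount2 k hk])
    simp only [List.map_append, List.map_cons, List.sum_append, List.sum_cons] at hIH ⊢
    rw [hA, hB, List.count_cons_self]
    push_cast
    rw [pvC2_succ]
    simp only [pvPairs]
    linarith [hIH]

-- ===== VERDICT (by name: the statement is the Claim_ definition above) =====
theorem findSimilarBirthdays_spec : Claim_equal_findSimilarBirthdays := by
  intro bs _ _
  unfold Spec_findSimilarBirthdays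
  rw [A_eq_pairs, B_eq_sum]
  exact (pairs_eq_sum _ _ (PySem.Set.nodup_ofList _)
    (fun k hk => (PySem.Set.mem_ofList _ _).mpr hk)).symm
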